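-- pv_equiv track=rewrite | github.com/kilyig/MTP_Breaker | mtp_breaker.py | latest_prefix
-- ===== SOURCE A (Python) =====
-- def latest_prefix(text):
--     '''
--     returns the substring that is between the last space character and the end of the string
--     '''
--     prefix = ""
--     for char in reversed(text):
--         if not char.isspace():
--             prefix += char
--         else:
--             break
--     return prefix[::-1]
-- ===== SOURCE B (Python) =====
-- def latest_prefix(text):
--     '''
--     returns the substring that is between the last space character and the end of the string
--     '''
--     last = -1
--     for i, char in enumerate(text):
--         if char.isspace():
--             last = i
--     return text[last + 1:]
-- ===== Notes on version B (the rewrite author's own statement) =====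
-- stated objective: simpler
-- what changed: Instead of walking the string backwards while building and then re-reversing an accumulator string with an early break, B makes one forward pass that only remembers the index of the last whitespace character and returns the slice text[last+1:]. (no intermediate strings are built, removing A's repeated concatenation/reversal)
import Mathlib
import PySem

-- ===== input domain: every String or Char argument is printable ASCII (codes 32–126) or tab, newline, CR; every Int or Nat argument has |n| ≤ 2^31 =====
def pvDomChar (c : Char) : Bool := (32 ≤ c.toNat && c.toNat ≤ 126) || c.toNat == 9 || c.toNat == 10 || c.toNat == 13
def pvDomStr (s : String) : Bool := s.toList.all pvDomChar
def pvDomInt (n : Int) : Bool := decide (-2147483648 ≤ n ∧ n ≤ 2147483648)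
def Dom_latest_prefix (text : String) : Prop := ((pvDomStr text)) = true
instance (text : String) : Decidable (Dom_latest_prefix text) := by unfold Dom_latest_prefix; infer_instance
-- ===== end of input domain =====

-- B replaces A's backward scan with early break (building and re-reversing an
-- accumulator string) by a single forward pass that remembers the index of the
-- last whitespace character and returns the slice text[last+1:]; objective: simpler.

-- ===== PORT A =====
-- A's loop over reversed(text) with break: structural recursion over the reversed list
def pvALoop (pref : List Char) : List Char → List Char
  | [] => pref
  | c :: rest =>
      if !(PySem.Chars.isspace c) then pvALoop (pref ++ [c]) rest else pref

def latest_prefix (text : String) : String :=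
  -- prefix[::-1] is reversal (PySem.List.slice?_none_none_neg_one)
  String.ofList (pvALoop [] text.toList.reverse).reverse

-- ===== PORT B =====
-- index of the most recent whitespace character, -1 if none (B's forward loop)
def pvLastWs (cs : List Char) : Int :=
  (PySem.List.enumerate cs 0).foldl
    (fun acc p => if PySem.Chars.isspace p.2 then p.1 else acc) (-1)

def latest_prefix_alt (text : String) : String :=
  PySem.Str.slice text (some (pvLastWs text.toList + 1)) none

-- ===== PRECONDITION & SPEC =====
def Spec_latest_prefix (text : String) (out : String) : Prop := out = latest_prefix_alt text
instance (text : String) (out : String) : Decidable (Spec_latest_prefix text out) := by unfold Spec_latest_prefix; infer_instance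

-- ===== CLAIM (what is proved, stated in full; the proofs are below) =====
def Claim_equal_latest_prefix : Prop := ∀ (text : String), Dom_latest_prefix text → Spec_latest_prefix text (latest_prefix text)

-- ===== LEMMAS AND PROOFS =====

theorem pvALoop_eq (l pref : List Char) :
    pvALoop pref l = pref ++ l.takeWhile (fun c => !PySem.Chars.isspace c) := by
  induction l generalizing pref with
  | nil => simp [pvALoop]
  | cons c rest ih =>
      by_cases h : PySem.Chars.isspace c
      · simp [pvALoop, h]
      · simp [pvALoop, h, ih]

theorem pvEnumerate_append (xs ys : List Char) (s : Int) :
    PySem.List.enumerate (xs ++ ys) s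
      = PySem.List.enumerate xs s ++ PySem.List.enumerate ys (s + xs.length) := by
  induction xs generalizing s with
  | nil => simp [PySem.List.enumerate_nil]
  | cons x xs ih =>
      simp [PySem.List.enumerate_cons, ih]
      ring_nf

theorem pvLastWs_append (xs : List Char) (c : Char) :
    pvLastWs (xs ++ [c])
      = if PySem.Chars.isspace c then (xs.length : Int) else pvLastWs xs := by
  unfold pvLastWs
  rw [pvEnumerate_append]
  simp [PySem.List.enumerate_cons, PySem.List.enumerate_nil]

theorem pvLastWs_bounds (l : List Char) :
    -1 ≤ pvLastWs l ∧ pvLastWs l < l.length := by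
  induction l using List.reverseRecOn with
  | nil => simp [pvLastWs, PySem.List.enumerate_nil]
  | append_singleton xs c ih =>
      rw [pvLastWs_append]
      by_cases h : PySem.Chars.isspace c <;> simp [h] <;> omega

theorem pvMain (l : List Char) :
    (l.reverse.takeWhile (fun c => !PySem.Chars.isspace c)).reverse
      = l.drop (pvLastWs l + 1).toNat := by
  induction l using List.reverseRecOn with
  | nil => simp [pvLastWs, PySem.List.enumerate_nil]
  | append_singleton xs c ih =>
      rw [pvLastWs_append]
      by_cases h : PySem.Chars.isspace c
      · simp [h]
      · have hb := pvLastWs_bounds xs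
        have hle : (pvLastWs xs + 1).toNat ≤ xs.length := by omega
        simp [h, ih, List.drop_append_of_le_length hle]

theorem latest_prefix_spec : Claim_equal_latest_prefix := by
  intro text _
  unfold Spec_latest_prefix latest_prefix latest_prefix_alt
  rw [PySem.Str.slice, PySem.Chars.slice]
  have hb := pvLastWs_bounds text.toList
  rw [pvALoop_eq, List.nil_append, pvMain]
  rw [PySem.List.slice_from text.toList (show (0:Int) ≤ pvLastWs text.toList + 1 by omega)]
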